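-- pv_equiv track=rewrite | github.com/DanielTromp/Atlas | src/infrastructure_atlas/agents/workers/reviewer.py | _assess_overall
-- ===== SOURCE A (Python) =====
-- from typing import Any
--
-- def _assess_overall(
--
--     categorization_review: dict[str, Any],
--     actions_review: dict[str, Any],
--     response_review: dict[str, Any],
-- ) -> dict[str, Any]:
--     """Determine overall assessment."""
--     decisions = [
--         categorization_review.get("decision"),
--         actions_review.get("decision"),
--         response_review.get("decision"),
--     ]
--
--     # Any rejection means overall reject
--     if "reject" in decisions or "flag" in decisions:
--         return {
--             "decision": "reject",
--             "summary": "Issues found that require human intervention",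
--         }
--
--     # Any modification needed
--     if any(d in decisions for d in ["suggest_change", "needs_edit", "rewrite", "needs_confirmation"]):
--         return {
--             "decision": "modify",
--             "summary": "Changes recommended before proceeding",
--         }
--
--     return {
--         "decision": "approve",
--         "summary": "All checks passed, ready to proceed",
--     }
-- ===== SOURCE B (Python) =====
-- def _assess_overall(categorization_review, actions_review, response_review):
--     """Determine overall assessment via a severity-rank table and one max pass."""
--     rank = {
--         "reject": 2,
--         "flag": 2,
--         "suggest_change": 1,
--         "needs_edit": 1,
--         "rewrite": 1,
--         "needs_confirmation": 1,
--     }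
--     sev = 0
--     for review in (categorization_review, actions_review, response_review):
--         sev = max(sev, rank.get(review.get("decision"), 0))
--     outcomes = [
--         ("approve", "All checks passed, ready to proceed"),
--         ("modify", "Changes recommended before proceeding"),
--         ("reject", "Issues found that require human intervention"),
--     ]
--     decision, summary = outcomes[sev]
--     return {"decision": decision, "summary": summary}
-- ===== Notes on version B (the rewrite author's own statement) =====
-- stated objective: alternative
-- what changed: Replaces A's two sequential membership scans over the decision list by a severity-rank table (reject/flag->2, the four modify strings->1, default 0), a single max-fold over the three decisions, and a table lookup mapping the max rank to the output dict.
import Mathlib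
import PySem

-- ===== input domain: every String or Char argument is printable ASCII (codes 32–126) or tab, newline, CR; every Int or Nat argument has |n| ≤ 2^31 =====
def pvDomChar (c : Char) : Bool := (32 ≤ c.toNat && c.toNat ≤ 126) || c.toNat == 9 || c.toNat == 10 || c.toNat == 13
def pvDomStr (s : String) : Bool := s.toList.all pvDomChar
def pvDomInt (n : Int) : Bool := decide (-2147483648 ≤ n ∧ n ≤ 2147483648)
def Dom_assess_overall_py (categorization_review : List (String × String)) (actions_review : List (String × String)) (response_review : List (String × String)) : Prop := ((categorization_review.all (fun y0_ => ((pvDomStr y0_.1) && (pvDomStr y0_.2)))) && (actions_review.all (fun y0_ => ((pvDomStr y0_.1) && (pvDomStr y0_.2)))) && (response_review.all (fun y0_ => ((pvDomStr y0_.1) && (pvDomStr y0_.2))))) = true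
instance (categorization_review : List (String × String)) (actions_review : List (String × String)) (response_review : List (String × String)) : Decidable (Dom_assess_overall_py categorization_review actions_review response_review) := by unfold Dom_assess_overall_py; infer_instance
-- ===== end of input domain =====

-- B replaces A's two membership scans by a severity-rank table, a max-fold and an outcome-table lookup (alternative decomposition, same cost).

-- ===== PORT A =====
def assess_overall_py (categorization_review : List (String × String)) (actions_review : List (String × String)) (response_review : List (String × String)) : List (String × String) :=
  let decisions : List (Option String) :=
    [(PySem.Dict.mk categorization_review).get? "decision",
     (PySem.Dict.mk actions_review).get? "decision",
     (PySem.Dict.mk response_review).get? "decision"]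
  if decisions.contains (some "reject") || decisions.contains (some "flag") then
    [("decision", "reject"), ("summary", "Issues found that require human intervention")]
  else if (["suggest_change", "needs_edit", "rewrite", "needs_confirmation"].any
            (fun d => decisions.contains (some d))) then
    [("decision", "modify"), ("summary", "Changes recommended before proceeding")]
  else
    [("decision", "approve"), ("summary", "All checks passed, ready to proceed")]

-- ===== PORT B =====
def pvRank : PySem.Dict String Int :=
  PySem.Dict.ofList [("reject", 2), ("flag", 2), ("suggest_change", 1), ("needs_edit", 1), ("rewrite", 1), ("needs_confirmation", 1)]

-- rank.get(review.get("decision"), 0); the None key is never in the rank dict, so it maps to the default 0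
def pvSev (d : Option String) : Int :=
  match d with
  | none => 0
  | some s => pvRank.getD s 0

def pvOutcomes : List (String × String) :=
  [("approve", "All checks passed, ready to proceed"),
   ("modify", "Changes recommended before proceeding"),
   ("reject", "Issues found that require human intervention")]

def assess_overall_py_alt (categorization_review : List (String × String)) (actions_review : List (String × String)) (response_review : List (String × String)) : List (String × String) :=
  let sev : Int :=
    [(PySem.Dict.mk categorization_review).get? "decision",
     (PySem.Dict.mk actions_review).get? "decision",
     (PySem.Dict.mk response_review).get? "decision"].foldl
      (fun acc d => max acc (pvSev d)) 0
  match PySem.List.pyGet? pvOutcomes sev with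
  | some p => [("decision", p.1), ("summary", p.2)]
  | none => []  -- unreachable: sev ∈ {0,1,2}

-- ===== PRECONDITION & SPEC =====
def Spec_assess_overall_py (categorization_review : List (String × String)) (actions_review : List (String × String)) (response_review : List (String × String)) (out : List (String × String)) : Prop := out = assess_overall_py_alt categorization_review actions_review response_review
instance (categorization_review : List (String × String)) (actions_review : List (String × String)) (response_review : List (String × String)) (out : List (String × String)) : Decidable (Spec_assess_overall_py categorization_review actions_review response_review out) := by unfold Spec_assess_overall_py; infer_instance

-- ===== CLAIM (what is proved, stated in full; the proofs are below) =====
def Claim_equal_assess_overall_py : Prop := ∀ (categorization_review : List (String × String)) (actions_review : List (String × String)) (response_review : List (String × String)), Dom_assess_overall_py categorization_review actions_review response_review → Spec_assess_overall_py categorization_review actions_review response_review (assess_overall_py categorization_review actions_review response_review)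

-- ===== LEMMAS AND PROOFS =====

lemma pvSev_trichotomy (d : Option String) :
    (pvSev d = 2 ∧ (d = some "reject" ∨ d = some "flag")) ∨
    (pvSev d = 1 ∧ (d = some "suggest_change" ∨ d = some "needs_edit" ∨ d = some "rewrite" ∨ d = some "needs_confirmation")) ∨
    (pvSev d = 0 ∧ d ≠ some "reject" ∧ d ≠ some "flag" ∧ d ≠ some "suggest_change" ∧ d ≠ some "needs_edit" ∧ d ≠ some "rewrite" ∧ d ≠ some "needs_confirmation") := by
  match d with
  | none => right; right; simp [pvSev]
  | some s =>
    by_cases h1 : s = "reject"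
    · left; subst h1; exact ⟨by decide, Or.inl rfl⟩
    by_cases h2 : s = "flag"
    · left; subst h2; exact ⟨by decide, Or.inr rfl⟩
    by_cases h3 : s = "suggest_change"
    · right; left; subst h3; exact ⟨by decide, Or.inl rfl⟩
    by_cases h4 : s = "needs_edit"
    · right; left; subst h4; exact ⟨by decide, Or.inr (Or.inl rfl)⟩
    by_cases h5 : s = "rewrite"
    · right; left; subst h5; exact ⟨by decide, Or.inr (Or.inr (Or.inl rfl))⟩
    by_cases h6 : s = "needs_confirmation"
    · right; left; subst h6; exact ⟨by decide, Or.inr (Or.inr (Or.inr rfl))⟩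
    · right; right
      refine ⟨?_, by simp [h1], by simp [h2], by simp [h3], by simp [h4], by simp [h5], by simp [h6]⟩
      have hR : pvRank = PySem.Dict.mk [("reject", (2 : Int)), ("flag", 2), ("suggest_change", 1), ("needs_edit", 1), ("rewrite", 1), ("needs_confirmation", 1)] := by decide
      have b1 : (("reject" : String) == s) = false := beq_eq_false_iff_ne.mpr (Ne.symm h1)
      have b2 : (("flag" : String) == s) = false := beq_eq_false_iff_ne.mpr (Ne.symm h2)
      have b3 : (("suggest_change" : String) == s) = false := beq_eq_false_iff_ne.mpr (Ne.symm h3)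
      have b4 : (("needs_edit" : String) == s) = false := beq_eq_false_iff_ne.mpr (Ne.symm h4)
      have b5 : (("rewrite" : String) == s) = false := beq_eq_false_iff_ne.mpr (Ne.symm h5)
      have b6 : (("needs_confirmation" : String) == s) = false := beq_eq_false_iff_ne.mpr (Ne.symm h6)
      simp only [pvSev, hR, PySem.Dict.getD_eq_get?_getD, PySem.Dict.get?]
      simp [b1, b2, b3, b4, b5, b6]

set_option maxHeartbeats 2000000 in
lemma core_eq (d1 d2 d3 : Option String) :
    (if [d1, d2, d3].contains (some "reject") || [d1, d2, d3].contains (some "flag") then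
      [("decision", "reject"), ("summary", "Issues found that require human intervention")]
    else if (["suggest_change", "needs_edit", "rewrite", "needs_confirmation"].any
              (fun d => [d1, d2, d3].contains (some d))) then
      [("decision", "modify"), ("summary", "Changes recommended before proceeding")]
    else
      [("decision", "approve"), ("summary", "All checks passed, ready to proceed")])
    = (match PySem.List.pyGet? pvOutcomes ([d1, d2, d3].foldl (fun acc d => max acc (pvSev d)) 0) with
       | some p => [("decision", p.1), ("summary", p.2)]
       | none => []) := by
  rcases pvSev_trichotomy d1 with ⟨e1, h1⟩ | ⟨e1, h1⟩ | ⟨e1, h1a, h1b, h1c, h1d, h1e, h1f⟩ <;>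
  rcases pvSev_trichotomy d2 with ⟨e2, h2⟩ | ⟨e2, h2⟩ | ⟨e2, h2a, h2b, h2c, h2d, h2e, h2f⟩ <;>
  rcases pvSev_trichotomy d3 with ⟨e3, h3⟩ | ⟨e3, h3⟩ | ⟨e3, h3a, h3b, h3c, h3d, h3e, h3f⟩ <;>
  simp only [List.foldl, e1, e2, e3]
  all_goals try rcases h1 with rfl | rfl
  all_goals try rcases h1 with rfl | rfl | rfl | rfl
  all_goals try rcases h2 with rfl | rfl
  all_goals try rcases h2 with rfl | rfl | rfl | rfl
  all_goals try rcases h3 with rfl | rfl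
  all_goals try rcases h3 with rfl | rfl | rfl | rfl
  all_goals simp_all [List.contains_eq_mem, pvOutcomes, PySem.List.pyGet?, PySem.List.pyIdx?]
  all_goals (repeat' apply And.intro)
  all_goals try (intro h; cases h; simp_all)
  all_goals (split_ifs with hA hB)
  · exfalso; rcases hA with (h | h | h) | (h | h | h) <;> simp_all
  · exfalso
    rcases hB with ((h | h | h) | (h | h | h) | (h | h | h) | (h | h | h)) <;> simp_all
  · simp

-- ===== VERDICT (by name: the statement is the Claim_ definition above) =====
theorem assess_overall_py_spec : Claim_equal_assess_overall_py := by
  intro c a r _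
  unfold Spec_assess_overall_py assess_overall_py assess_overall_py_alt
  exact core_eq _ _ _
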